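-- pv_equiv track=rewrite | github.com/jaymzjulian/beyond-ralph | src/beyond_ralph/core/audit.py | _is_in_docstring
-- ===== SOURCE A (Python) =====
-- def _is_in_docstring(lines: list[str], line_index: int) -> bool:
--     """Check if a line is inside a docstring."""
--     in_docstring = False
--     for i in range(line_index):
--         stripped = lines[i].strip()
--         triple_double = stripped.count('"""')
--         triple_single = stripped.count("'''")
--         total = triple_double + triple_single
--         if total % 2 == 1:
--             in_docstring = not in_docstring
--     return in_docstring
-- ===== SOURCE B (Python) =====
-- def _is_in_docstring(lines: list[str], line_index: int) -> bool:
--     """Check if a line is inside a docstring."""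
--     text = "\n".join(lines[:max(line_index, 0)])
--     return (text.count('"""') + text.count("'''")) % 2 == 1
-- ===== Notes on version B (the rewrite author's own statement) =====
-- stated objective: simpler
-- what changed: Instead of A's per-line loop (strip each line, count its triple-quote tokens, toggle a boolean on odd counts), B joins the prior lines into one newline-separated text and returns the parity of two global substring counts; there is no loop, no stripping and no per-line state.
import Mathlib
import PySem

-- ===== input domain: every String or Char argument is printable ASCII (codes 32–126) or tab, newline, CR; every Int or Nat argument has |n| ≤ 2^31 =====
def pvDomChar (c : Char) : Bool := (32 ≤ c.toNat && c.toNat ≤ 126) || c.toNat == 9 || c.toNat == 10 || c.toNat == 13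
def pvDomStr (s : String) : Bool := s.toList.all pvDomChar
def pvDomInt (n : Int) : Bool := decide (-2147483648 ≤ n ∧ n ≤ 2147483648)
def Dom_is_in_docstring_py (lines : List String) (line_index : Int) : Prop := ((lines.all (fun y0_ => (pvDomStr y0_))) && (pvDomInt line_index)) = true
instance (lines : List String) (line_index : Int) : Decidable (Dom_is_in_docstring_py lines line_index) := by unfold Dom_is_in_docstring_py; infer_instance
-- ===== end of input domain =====

-- B replaces A's per-line toggling loop (strip, count, flip a flag on odd counts) by joining the
-- prior lines with newlines and returning the parity of two global substring counts (objective: simpler).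

-- ===== PORT A =====
def is_in_docstring_py (lines : List String) (line_index : Int) : Bool :=
  (PySem.List.pyRange 0 line_index 1).foldl (fun in_docstring i =>
    let stripped := PySem.Str.strip (PySem.List.pyGetD lines i "")
    let triple_double := PySem.Str.count stripped "\"\"\""
    let triple_single := PySem.Str.count stripped "'''"
    let total := triple_double + triple_single
    if total % 2 == 1 then !in_docstring else in_docstring) false

-- ===== PORT B =====
def is_in_docstring_py_alt (lines : List String) (line_index : Int) : Bool :=
  let text := PySem.Str.join "\n" (PySem.List.slice lines none (some (max line_index 0)))
  (PySem.Str.count text "\"\"\"" + PySem.Str.count text "'''") % 2 == 1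

-- ===== PRECONDITION & SPEC =====
-- A reads lines[i] for every i in range(line_index): it raises IndexError iff line_index > len(lines).
def Pre_is_in_docstring_py (lines : List String) (line_index : Int) : Prop :=
  line_index ≤ (lines.length : Int)
instance (lines : List String) (line_index : Int) : Decidable (Pre_is_in_docstring_py lines line_index) := by unfold Pre_is_in_docstring_py; infer_instance

def pvWitness_is_in_docstring_py : List String × Int := (["\"\"\"doc\"\"\"", "x = 1"], 2)

def Spec_is_in_docstring_py (lines : List String) (line_index : Int) (out : Bool) : Prop := out = is_in_docstring_py_alt lines line_index
instance (lines : List String) (line_index : Int) (out : Bool) : Decidable (Spec_is_in_docstring_py lines line_index out) := by unfold Spec_is_in_docstring_py; infer_instance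

-- ===== CLAIM (what is proved, stated in full; the proofs are below) =====
def Claim_equal_is_in_docstring_py : Prop := ∀ (lines : List String) (line_index : Int), Dom_is_in_docstring_py lines line_index → Pre_is_in_docstring_py lines line_index → Spec_is_in_docstring_py lines line_index (is_in_docstring_py lines line_index)

-- ===== LEMMAS AND PROOFS =====

def pvCnt (sub : List Char) : List Char → Nat
  | [] => 0
  | c :: t =>
    if sub ≠ [] ∧ sub.isPrefixOf (c :: t) then 1 + pvCnt sub (t.drop (sub.length - 1))
    else pvCnt sub t
  termination_by s => s.length
  decreasing_by
    all_goals (simp only [List.length_cons, List.length_drop]; omega)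

theorem pvCnt_nil (sub : List Char) : pvCnt sub [] = 0 := by simp [pvCnt]
theorem pvCnt_cons (sub : List Char) (c : Char) (t : List Char) :
    pvCnt sub (c :: t) = if sub ≠ [] ∧ sub.isPrefixOf (c :: t) then 1 + pvCnt sub (t.drop (sub.length - 1)) else pvCnt sub t := by
  rw [pvCnt]

theorem pv_prefix_concat (sub a b : List Char) (c : Char) (hc : c ∉ sub)
    (h : sub <+: (a ++ c :: b)) : sub.length ≤ a.length ∧ sub <+: a := by
  have hlen : sub.length ≤ a.length := by
    by_contra hgt
    have hi : a.length < sub.length := by omega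
    have := h.getElem (i := a.length) hi
    rw [List.getElem_append_right (le_refl a.length)] at this
    simp only [Nat.sub_self, List.getElem_cons_zero] at this
    exact hc (this ▸ List.getElem_mem hi)
  exact ⟨hlen, List.prefix_of_prefix_length_le h (List.prefix_append a (c :: b)) hlen⟩

theorem pvCnt_cons_notmem (sub : List Char) (c : Char) (hc : c ∉ sub) (t : List Char) :
    pvCnt sub (c :: t) = pvCnt sub t := by
  rw [pvCnt_cons, if_neg]
  rintro ⟨hne, hp⟩
  obtain ⟨d, sub', rfl⟩ := List.exists_cons_of_ne_nil hne
  obtain ⟨rest, heq⟩ := List.isPrefixOf_iff_prefix.mp hp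
  simp at heq
  exact hc (by simp [heq.1])

theorem pvCnt_split_aux (sub : List Char) (c : Char) (hc : c ∉ sub) :
    ∀ (n : Nat) (a b : List Char), a.length ≤ n →
      pvCnt sub (a ++ c :: b) = pvCnt sub a + pvCnt sub b := by
  intro n
  induction n with
  | zero =>
    intro a b hlen
    have : a = [] := List.eq_nil_of_length_eq_zero (by omega)
    subst this
    simp [pvCnt_nil, pvCnt_cons_notmem sub c hc]
  | succ n ih =>
    intro a b hlen
    cases a with
    | nil => simp [pvCnt_nil, pvCnt_cons_notmem sub c hc]
    | cons x a' =>
      rw [List.cons_append, pvCnt_cons]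
      by_cases hcond : sub ≠ [] ∧ sub.isPrefixOf (x :: (a' ++ c :: b))
      · obtain ⟨hlen2, hpa⟩ := pv_prefix_concat sub (x :: a') b c hc
          (List.isPrefixOf_iff_prefix.mp hcond.2)
        rw [if_pos hcond]
        have hk : sub.length - 1 ≤ a'.length := by simp at hlen2; omega
        rw [List.drop_append_of_le_length hk]
        rw [ih (a'.drop (sub.length - 1)) b (by simp; simp at hlen; omega)]
        rw [pvCnt_cons, if_pos ⟨hcond.1, List.isPrefixOf_iff_prefix.mpr hpa⟩]
        omega
      · rw [if_neg hcond]
        rw [ih (a') b (by simp at hlen; omega)]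
        rw [pvCnt_cons, if_neg]
        rintro ⟨hne, hp⟩
        exact hcond ⟨hne, List.isPrefixOf_iff_prefix.mpr
          ((List.isPrefixOf_iff_prefix.mp hp).trans (by rw [← List.cons_append]; exact List.prefix_append _ _))⟩

theorem pvCnt_split (sub : List Char) (c : Char) (hc : c ∉ sub) (a b : List Char) :
    pvCnt sub (a ++ c :: b) = pvCnt sub a + pvCnt sub b :=
  pvCnt_split_aux sub c hc a.length a b (le_refl _)

theorem pvCnt_prefix_junk (sub u s : List Char) (h : ∀ c ∈ u, c ∉ sub) :
    pvCnt sub (u ++ s) = pvCnt sub s := by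
  induction u with
  | nil => rfl
  | cons c u ih =>
    rw [List.cons_append, pvCnt_cons_notmem sub c (h c (by simp)) ]
    exact ih (fun c hc => h c (by simp [hc]))

theorem pvCnt_junk (sub u : List Char) (h : ∀ c ∈ u, c ∉ sub) : pvCnt sub u = 0 := by
  have := pvCnt_prefix_junk sub u [] h
  simpa [pvCnt_nil] using this

theorem pvCnt_suffix_junk (sub u s : List Char) (h : ∀ c ∈ u, c ∉ sub) :
    pvCnt sub (s ++ u) = pvCnt sub s := by
  cases u with
  | nil => simp
  | cons c u =>
    rw [pvCnt_split sub c (h c (by simp)) s u,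
        pvCnt_junk sub u (fun d hd => h d (by simp [hd]))]
    omega

theorem pvCnt_strip (sub s : List Char) (h : ∀ c, PySem.Chars.isspace c = true → c ∉ sub) :
    pvCnt sub (PySem.Chars.strip s) = pvCnt sub s := by
  unfold PySem.Chars.strip PySem.Chars.rstrip PySem.Chars.lstrip
  have h1 : ∀ (t : List Char), pvCnt sub ((t.reverse.dropWhile PySem.Chars.isspace).reverse) = pvCnt sub t := by
    intro t
    conv_rhs => rw [show t = (t.reverse.dropWhile PySem.Chars.isspace).reverse ++ (t.reverse.takeWhile PySem.Chars.isspace).reverse from by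
      rw [← List.reverse_append, List.takeWhile_append_dropWhile, List.reverse_reverse]]
    rw [pvCnt_suffix_junk]
    intro c hc
    exact h c (List.mem_takeWhile_imp (List.mem_reverse.mp hc))
  rw [h1]
  conv_rhs => rw [show s = s.takeWhile PySem.Chars.isspace ++ s.dropWhile PySem.Chars.isspace from (List.takeWhile_append_dropWhile).symm]
  rw [pvCnt_prefix_junk]
  intro c hc
  exact h c (List.mem_takeWhile_imp hc)

theorem pvCnt_join (sub : List Char) (hn : ('\n' : Char) ∉ sub) (parts : List (List Char)) :
    pvCnt sub (PySem.Chars.join ['\n'] parts) = (parts.map (pvCnt sub)).sum := by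
  induction parts with
  | nil => simp [PySem.Chars.join_nil, pvCnt_nil]
  | cons p parts ih =>
    cases parts with
    | nil => simp [PySem.Chars.join_singleton]
    | cons q rest =>
      have : PySem.Chars.join ['\n'] (p :: q :: rest) = p ++ '\n' :: PySem.Chars.join ['\n'] (q :: rest) := by
        rw [PySem.Chars.join_cons_cons]; simp
      rw [this, pvCnt_split sub '\n' hn, ih]
      simp

theorem pvCnt_go_eq (sub : List Char) (hsub : sub ≠ []) :
    ∀ (fuel : Nat) (s : List Char) (acc : Nat), s.length ≤ fuel →
      PySem.Chars.count.go sub fuel s acc = acc + pvCnt sub s := by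
  intro fuel
  induction fuel with
  | zero =>
    intro s acc h
    have hs : s = [] := List.eq_nil_of_length_eq_zero (by omega)
    subst hs
    simp [PySem.Chars.count.go, pvCnt_nil]
  | succ fuel ih =>
    intro s acc h
    cases s with
    | nil => simp [PySem.Chars.count.go, pvCnt_nil]
    | cons c t =>
      rw [PySem.Chars.count.go]
      by_cases hp : sub.isPrefixOf (c :: t)
      · rw [if_pos hp]
        have hl : sub.length = (sub.length - 1) + 1 := by
          have := List.length_pos_of_ne_nil hsub; omega
        rw [hl, List.drop_succ_cons]
        rw [ih (t.drop (sub.length - 1)) (acc + 1) (by simp at h ⊢; omega)]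
        rw [pvCnt_cons, if_pos ⟨hsub, hp⟩]
        omega
      · rw [if_neg hp]
        rw [ih t acc (by simp at h; omega)]
        rw [pvCnt_cons, if_neg (by rintro ⟨_, hpp⟩; exact hp hpp)]

theorem pvCnt_eq_count (sub s : List Char) (hsub : sub ≠ []) :
    PySem.Chars.count s sub = pvCnt sub s := by
  rw [PySem.Chars.count, if_neg (by simpa using hsub)]
  simpa using pvCnt_go_eq sub hsub s.length s 0 (le_refl _)

theorem pv_map_pyGetD_range {α β : Type} (xs : List α) (d : α) (g : α → β) (n : Nat) (hn : n ≤ xs.length) :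
    (PySem.List.pyRange 0 (n : Int) 1).map (fun i => g (PySem.List.pyGetD xs i d))
      = (xs.take n).map g := by
  induction n with
  | zero => simp [PySem.List.pyRange_one_eq_nil]
  | succ n ih =>
    have h1 : ((n : Int) + 1) = ((n + 1 : Nat) : Int) := by push_cast; ring
    rw [← h1, PySem.List.pyRange_one_succ_right (by positivity), List.map_append,
        ih (by omega), List.take_add_one, List.map_append]
    congr 1
    have hlt : n < xs.length := by omega
    simp [PySem.List.pyGetD_natCast, List.getD_eq_getElem?_getD, List.getElem?_eq_getElem hlt]

theorem pv_sum_map_add {α : Type} (xs : List α) (f g : α → Nat) :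
    (xs.map (fun x => f x + g x)).sum = (xs.map f).sum + (xs.map g).sum := by
  induction xs with
  | nil => simp
  | cons x xs ih => simp [ih]; omega

theorem pv_toggle_eq_parity (f : Int → Nat) (L : List Int) (acc : Bool) :
    L.foldl (fun b i => if f i % 2 == 1 then !b else b) acc
      = (acc ^^ ((L.map f).sum % 2 == 1)) := by
  induction L generalizing acc with
  | nil => simp
  | cons i L ih =>
    simp only [List.foldl_cons, List.map_cons, List.sum_cons, ih]
    rcases Nat.even_or_odd (f i) with h | h <;>
      rcases Nat.even_or_odd ((L.map f).sum) with h2 | h2 <;>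
      · have h1 := Nat.even_add (m := f i) (n := (L.map f).sum)
        cases acc <;> simp_all [Nat.even_iff, Nat.odd_iff]

-- per line: triple-quote counts survive strip
theorem pv_line_counts (l : String) :
    PySem.Str.count (PySem.Str.strip l) "\"\"\"" + PySem.Str.count (PySem.Str.strip l) "'''"
      = pvCnt "\"\"\"".toList l.toList + pvCnt "'''".toList l.toList := by
  have hdq : ("\"\"\"".toList : List Char) ≠ [] := by decide
  have hsq : ("'''".toList : List Char) ≠ [] := by decide
  rw [PySem.Str.count_eq, PySem.Str.count_eq, PySem.Str.toList_strip,
      pvCnt_eq_count _ _ hdq, pvCnt_eq_count _ _ hsq,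
      pvCnt_strip, pvCnt_strip]
  · intro c hsp hm
    rw [show ("'''".toList : List Char) = ['\'','\'','\''] from rfl] at hm
    simp at hm; subst hm; exact absurd hsp (by decide)
  · intro c hsp hm
    rw [show ("\"\"\"".toList : List Char) = ['"','"','"'] from rfl] at hm
    simp at hm; subst hm; exact absurd hsp (by decide)

theorem pv_text_counts (P : List String) :
    PySem.Str.count (PySem.Str.join "\n" P) "\"\"\"" + PySem.Str.count (PySem.Str.join "\n" P) "'''"
      = (P.map (fun l => pvCnt "\"\"\"".toList l.toList + pvCnt "'''".toList l.toList)).sum := by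
  have hdq : ("\"\"\"".toList : List Char) ≠ [] := by decide
  have hsq : ("'''".toList : List Char) ≠ [] := by decide
  have hndq : ('\n' : Char) ∉ ("\"\"\"".toList : List Char) := by decide
  have hnsq : ('\n' : Char) ∉ ("'''".toList : List Char) := by decide
  rw [PySem.Str.count_eq, PySem.Str.count_eq,
      pvCnt_eq_count _ _ hdq, pvCnt_eq_count _ _ hsq,
      PySem.Str.toList_join,
      show ("\n" : String).toList = ['\n'] from rfl,
      pvCnt_join _ hndq, pvCnt_join _ hnsq,
      pv_sum_map_add]
  simp [List.map_map, Function.comp_def]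

set_option maxHeartbeats 1000000 in
theorem pv_main (lines : List String) (line_index : Int)
    (hpre : line_index ≤ (lines.length : Int)) :
    is_in_docstring_py lines line_index = is_in_docstring_py_alt lines line_index := by
  unfold is_in_docstring_py is_in_docstring_py_alt
  by_cases hli : line_index ≤ 0
  · rw [PySem.List.pyRange_one_eq_nil hli]
    simp only [List.foldl_nil]
    show false = ((PySem.Str.count (PySem.Str.join "\n" (PySem.List.slice lines none (some (max line_index 0)))) "\"\"\""
        + PySem.Str.count (PySem.Str.join "\n" (PySem.List.slice lines none (some (max line_index 0)))) "'''") % 2 == 1)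
    rw [show max line_index 0 = (0 : Int) from by omega,
        PySem.List.slice_to lines (le_refl (0 : Int))]
    simp only [Int.toNat_zero, List.take_zero]
    have h2 := pv_text_counts []
    simp only [List.map_nil, List.sum_nil] at h2
    rw [h2]
    rfl
  · have h0 : (0 : Int) ≤ line_index := by omega
    obtain ⟨n, rfl⟩ : ∃ n : Nat, line_index = (n : Int) :=
      ⟨line_index.toNat, (Int.toNat_of_nonneg h0).symm⟩
    have hn : n ≤ lines.length := by exact_mod_cast hpre
    show (PySem.List.pyRange 0 ((n : Int)) 1).foldl (fun b i =>
        if (PySem.Str.count (PySem.Str.strip (PySem.List.pyGetD lines i "")) "\"\"\""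
            + PySem.Str.count (PySem.Str.strip (PySem.List.pyGetD lines i "")) "'''") % 2 == 1
        then !b else b) false
      = ((PySem.Str.count (PySem.Str.join "\n" (PySem.List.slice lines none (some (max ((n : Int)) 0)))) "\"\"\""
          + PySem.Str.count (PySem.Str.join "\n" (PySem.List.slice lines none (some (max ((n : Int)) 0)))) "'''") % 2 == 1)
    rw [show max ((n : Int)) 0 = ((n : Int)) from by omega,
        PySem.List.slice_to lines (by positivity : (0 : Int) ≤ (n : Int)), Int.toNat_natCast]
    rw [pv_toggle_eq_parity (fun i =>
      PySem.Str.count (PySem.Str.strip (PySem.List.pyGetD lines i "")) "\"\"\""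
        + PySem.Str.count (PySem.Str.strip (PySem.List.pyGetD lines i "")) "'''")]
    simp only [Bool.false_xor]
    have key : ((PySem.List.pyRange 0 ((n : Int)) 1).map (fun i =>
        PySem.Str.count (PySem.Str.strip (PySem.List.pyGetD lines i "")) "\"\"\""
          + PySem.Str.count (PySem.Str.strip (PySem.List.pyGetD lines i "")) "'''")).sum
        = PySem.Str.count (PySem.Str.join "\n" (lines.take n)) "\"\"\""
          + PySem.Str.count (PySem.Str.join "\n" (lines.take n)) "'''" := by
      rw [pv_map_pyGetD_range lines "" (fun l =>
        PySem.Str.count (PySem.Str.strip l) "\"\"\"" + PySem.Str.count (PySem.Str.strip l) "'''") n hn]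
      rw [pv_text_counts]
      congr 1
      exact List.map_congr_left (fun l _ => pv_line_counts l)
    rw [key]

-- ===== VERDICT (by name: the statement is the Claim_ definition above) =====
theorem is_in_docstring_py_spec : Claim_equal_is_in_docstring_py := by
  intro lines line_index _ hpre
  unfold Spec_is_in_docstring_py
  exact pv_main lines line_index hpre
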